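-- pv_equiv track=rewrite | github.com/Sfera-IT/adventofcode2020 | Lazza/06/06b.py | answers
-- ===== SOURCE A (Python) =====
-- def answers(group):
--     words = [
--         w for w in group.split(' ')
--         if len(w) > 0
--     ]
--     if not len(words):
--         return 0
--     result = 0
--     for letter in words[0]:
--         partial = 0
--         for word in words:
--             if letter in word:
--                 partial = partial + 1
--         if partial == len(words):
--             result = result + 1
--     return result
-- ===== SOURCE B (Python) =====
-- def answers(group):
--     words = [w for w in group.split(' ') if w]
--     if not words:
--         return 0
--     common = set(words[0])
--     for w in words[1:]:
--         common &= set(w)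
--     return sum(1 for c in words[0] if c in common)
-- ===== Notes on version B (the rewrite author's own statement) =====
-- stated objective: faster
-- what changed: Replaces the per-letter scan over all words (substring test for each letter of words[0] in each word) by one precomputed intersection of all words' character sets, then a single count of words[0]'s characters in it.
import Mathlib
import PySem

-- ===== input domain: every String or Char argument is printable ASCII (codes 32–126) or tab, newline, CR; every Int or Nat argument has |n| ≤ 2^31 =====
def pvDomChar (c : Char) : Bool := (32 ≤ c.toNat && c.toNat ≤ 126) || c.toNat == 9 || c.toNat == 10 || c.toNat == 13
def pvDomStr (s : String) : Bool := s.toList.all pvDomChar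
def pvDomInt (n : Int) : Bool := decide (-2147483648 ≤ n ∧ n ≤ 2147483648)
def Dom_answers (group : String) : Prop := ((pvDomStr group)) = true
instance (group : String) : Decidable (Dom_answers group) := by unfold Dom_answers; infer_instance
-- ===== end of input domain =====

-- ===== PORT A =====
-- A: split on ' ', drop empty words; for each letter of words[0] count the words
-- containing it and add 1 to the result when that count equals len(words).
def answers (group : String) : Int :=
  let words := (PySem.Chars.splitOn group.toList [' ']).filter (fun w => 0 < w.length)
  if words.length = 0 then 0
  else
    (words.headD []).foldl
      (fun result letter =>
        let part := words.foldl
          (fun p word => if PySem.Chars.isIn [letter] word then p + 1 else p) (0 : Int)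
        if part = (words.length : Int) then result + 1 else result) 0

-- ===== PORT B =====
-- B: intersect the character sets of all words once, then count the characters of
-- words[0] lying in that intersection.
def answers_alt (group : String) : Int :=
  let words := (PySem.Chars.splitOn group.toList [' ']).filter (fun w => 0 < w.length)
  match words with
  | [] => 0
  | w0 :: rest =>
    let common := rest.foldl (fun s w => PySem.Set.inter s (PySem.Set.ofList w))
      (PySem.Set.ofList w0)
    ((w0.filter (fun c => PySem.Set.contains common c)).length : Int)

-- ===== PRECONDITION & SPEC =====
def Spec_answers (group : String) (out : Int) : Prop := out = answers_alt group
instance (group : String) (out : Int) : Decidable (Spec_answers group out) := by unfold Spec_answers; infer_instance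

-- ===== CLAIM (what is proved, stated in full; the proofs are below) =====
def Claim_equal_answers : Prop := ∀ (group : String), Dom_answers group → Spec_answers group (answers group)

-- ===== LEMMAS AND PROOFS =====

-- membership in the folded intersection of character sets
theorem mem_foldl_inter (rest : List (List Char)) (s : PySem.Set Char) (c : Char) :
    c ∈ rest.foldl (fun s w => PySem.Set.inter s (PySem.Set.ofList w)) s ↔
      c ∈ s ∧ ∀ w ∈ rest, c ∈ w := by
  induction rest generalizing s with
  | nil => simp
  | cons w ws ih =>
    simp only [List.foldl_cons, ih, PySem.Set.mem_inter, PySem.Set.mem_ofList,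
      List.forall_mem_cons]
    tauto

-- the core equivalence on the nonempty word list
theorem answers_core (w0 : List Char) (rest : List (List Char)) :
    (w0.foldl
      (fun result letter =>
        if (w0 :: rest).foldl
            (fun p word => if PySem.Chars.isIn [letter] word then p + 1 else p) (0 : Int)
            = ((w0 :: rest).length : Int) then result + 1 else result) 0)
    = ((w0.filter (fun c =>
        PySem.Set.contains
          (rest.foldl (fun s w => PySem.Set.inter s (PySem.Set.ofList w))
            (PySem.Set.ofList w0)) c)).length : Int) := by
  rw [PySem.List.foldl_ite_add_one
    (fun letter => (w0 :: rest).foldl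
      (fun p word => if PySem.Chars.isIn [letter] word then p + 1 else p) (0 : Int)
      = ((w0 :: rest).length : Int)) w0 0]
  rw [← List.countP_eq_length_filter, zero_add, Nat.cast_inj]
  apply List.countP_congr
  intro c hc
  rw [PySem.List.foldl_if_add_one (fun word => PySem.Chars.isIn [c] word) (w0 :: rest) 0]
  simp only [decide_eq_true_eq, zero_add, Nat.cast_inj, List.countP_eq_length,
    PySem.Chars.isIn_iff_infix, List.singleton_infix_iff, PySem.Set.contains_iff,
    mem_foldl_inter, PySem.Set.mem_ofList, List.forall_mem_cons]

-- ===== VERDICT (by name: the statement is the Claim_ definition above) =====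
theorem answers_spec : Claim_equal_answers := by
  intro group _
  unfold Spec_answers answers answers_alt
  cases h : (PySem.Chars.splitOn group.toList [' ']).filter (fun w => 0 < w.length) with
  | nil => simp
  | cons w0 rest =>
    rw [if_neg (by simp), List.headD_cons]
    exact answers_core w0 rest
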